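-- pv_equiv track=rewrite | github.com/carlosp/advent-of-code | 2023/14-parabolic-reflector-dish/solve_2.py | computeTotalLoad
-- ===== SOURCE A (Python) =====
-- CYCLE_TILT_DIRECTIONS = [(-1, 0), (0, -1), (1, 0), (0, 1)]
--
-- NUM_CYCLES = 1000000000
--
-- def tilt(grid, height, width, direction, roundedRocks):
-- 	drow, dcol = direction
-- 	newRoundedRocks = []
--
-- 	for row, col in roundedRocks:
-- 		startRow, startCol = row, col
-- 		movedDistance = 0
--
-- 		while True:
-- 			row, col = row + drow, col + dcol
--
-- 			if row < 0 or row == height or col < 0 or col == width or grid[row][col] == '#':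
-- 				break
--
-- 			movedDistance += (row, col) not in roundedRocks
--
-- 		newRoundedRocks += [(startRow + drow * movedDistance, startCol + dcol * movedDistance)]
--
-- 	return frozenset(newRoundedRocks)
--
-- def computeTotalLoad(grid):
-- 	height, width = len(grid), len(grid[0])
-- 	roundedRocks = frozenset([(row, col) for row in range(height) for col in range(width) if grid[row][col] == 'O'])
-- 	seenStates = {}
--
-- 	for cycle in range(NUM_CYCLES):
-- 		seenStates[roundedRocks] = cycle
--
-- 		for direction in CYCLE_TILT_DIRECTIONS:
-- 			roundedRocks = tilt(grid, height, width, direction, roundedRocks)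
--
-- 		if previousCycle := seenStates.get(roundedRocks):
-- 			cycleLength = (cycle + 1) - previousCycle
-- 			remainingCycles = (NUM_CYCLES - cycle - 1) % cycleLength
-- 			roundedRocks = next(state for state, cycle in seenStates.items() if cycle == previousCycle + remainingCycles)
-- 			break
--
-- 	return sum(height - row for row, _ in roundedRocks)
-- ===== SOURCE B (Python) =====
-- CYCLE_TILT_DIRECTIONS = [(-1, 0), (0, -1), (1, 0), (0, 1)]
--
-- NUM_CYCLES = 1000000000
--
-- def tilt(grid, height, width, direction, rocks):
-- 	# One sweep over the whole grid: for every cell, tabulate the length of the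
-- 	# open ray toward the barrier and how many rounded rocks sit on it; each rock
-- 	# then moves (ray - occupied) steps in O(1), no per-rock cell walk.
-- 	drow, dcol = direction
-- 	cells = sorted(((r, c) for r in range(height) for c in range(width)),
-- 	               key=lambda p: -(drow * p[0] + dcol * p[1]))
-- 	table = {}
-- 	for r, c in cells:
-- 		ur, uc = r + drow, c + dcol
-- 		if ur < 0 or ur == height or uc < 0 or uc == width or grid[ur][uc] == '#':
-- 			table[(r, c)] = (0, 0)
-- 		else:
-- 			ray, occ = table.get((ur, uc), (0, 0))
-- 			table[(r, c)] = (ray + 1, occ + ((ur, uc) in rocks))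
-- 	out = []
-- 	for r, c in rocks:
-- 		ray, occ = table.get((r, c), (0, 0))
-- 		move = ray - occ
-- 		out.append((r + drow * move, c + dcol * move))
-- 	return frozenset(out)
--
-- def spin(grid, height, width, state):
-- 	state = tilt(grid, height, width, (-1, 0), state)
-- 	state = tilt(grid, height, width, (0, -1), state)
-- 	state = tilt(grid, height, width, (1, 0), state)
-- 	return tilt(grid, height, width, (0, 1), state)
--
-- def computeTotalLoad(grid):
-- 	height, width = len(grid), len(grid[0])
-- 	state = frozenset((row, col) for row in range(height) for col in range(width)
-- 	                  if grid[row][col] == 'O')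
-- 	seen = {}
-- 	for cycle in range(NUM_CYCLES):
-- 		seen[state] = cycle
-- 		state = spin(grid, height, width, state)
-- 		if previous := seen.get(state):
-- 			target = previous + (NUM_CYCLES - cycle - 1) % (cycle + 1 - previous)
-- 			state = next(s for s, c in seen.items() if c == target)
-- 			break
-- 	return sum(height - row for row, _ in state)
-- ===== Notes on version B (the rewrite author's own statement) =====
-- stated objective: alternative
-- what changed: Each tilt is computed by one whole-grid sweep (cells processed toward the tilt direction) that tabulates per cell the open-ray length to the nearest barrier and the rounded rocks on it, so every rock is placed with one O(1) table lookup instead of A's per-rock cell-by-cell walk with a membership test at every step.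
import Mathlib
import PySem

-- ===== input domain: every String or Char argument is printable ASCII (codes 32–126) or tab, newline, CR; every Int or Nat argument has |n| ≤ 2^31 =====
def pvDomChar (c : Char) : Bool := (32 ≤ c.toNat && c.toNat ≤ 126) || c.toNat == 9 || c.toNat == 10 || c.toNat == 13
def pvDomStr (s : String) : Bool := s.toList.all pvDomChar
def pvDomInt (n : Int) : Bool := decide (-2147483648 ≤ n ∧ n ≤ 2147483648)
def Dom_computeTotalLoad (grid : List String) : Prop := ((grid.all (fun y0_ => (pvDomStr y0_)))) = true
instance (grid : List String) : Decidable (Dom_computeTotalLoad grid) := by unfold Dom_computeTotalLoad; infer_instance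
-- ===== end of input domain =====

-- B replaces A's per-rock cell-by-cell walk in each tilt by one whole-grid sweep that
-- tabulates, per cell, the open-ray length to the barrier and the rocks on it (alternative
-- algorithm, not measured faster on the sampled inputs).

-- ===== PORT A =====
-- helpers shared by both ports (each is one identical line of the two Pythons):
-- grid[r][c] (None = IndexError), sum(height - row ...), and the initial 'O' comprehension.
def pvCell (grid : List String) (r c : Int) : Option Char :=
  match PySem.List.pyGet? grid r with
  | some s => PySem.Str.pyGet? s c
  | none => none

-- 'row < 0 or row == height or col < 0 or col == width or grid[row][col] == "#"' (verbatim in both Pythons)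
def pvBlocked (grid : List String) (h w r c : Int) : Bool :=
  decide (r < 0) || decide (r = h) || decide (c < 0) || decide (c = w) ||
    decide (pvCell grid r c = some '#')

def pvLoad (h : Int) (rocks : List (Int × Int)) : Int :=
  rocks.foldl (fun acc p => acc + (h - p.1)) 0

def pvInitRocks (grid : List String) (h w : Int) : PySem.Set (Int × Int) :=
  PySem.Set.ofList ((PySem.List.pyRange 0 h 1).flatMap (fun r =>
    (PySem.List.pyRange 0 w 1).filterMap (fun c =>
      if pvCell grid r c = some 'O' then some (r, c) else none)))

-- Python keys the seen-states dict by frozensets, which compare as finite sets; both ports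
-- model such a key by its canonical sorted element list (sorted by a key injective on grid cells).
def pvCanon (w : Int) (s : PySem.Set (Int × Int)) : List (Int × Int) :=
  PySem.List.sorted s (fun p => p.1 * (w + 1) + p.2) false

-- fuel for A's 'while True' walk: the walk moves one step per iteration and stops at the
-- grid border, so it always takes fewer steps than this bound
def pvFuel (h w : Int) : Nat := (2 * (h + w)).toNat + 4

def pvWalk (grid : List String) (h w dr dc : Int) (rocks : List (Int × Int)) :
    Nat → Int → Int → Int → Int
  | 0, _, _, acc => acc
  | f + 1, row, col, acc =>
    if pvBlocked grid h w (row + dr) (col + dc) then acc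
    else pvWalk grid h w dr dc rocks f (row + dr) (col + dc)
      (acc + (if (row + dr, col + dc) ∈ rocks then 0 else 1))

def pvTiltA (grid : List String) (h w dr dc : Int) (rocks : PySem.Set (Int × Int)) :
    PySem.Set (Int × Int) :=
  PySem.Set.ofList (rocks.foldl (fun acc p =>
    acc ++ [(p.1 + dr * pvWalk grid h w dr dc rocks (pvFuel h w) p.1 p.2 0,
             p.2 + dc * pvWalk grid h w dr dc rocks (pvFuel h w) p.1 p.2 0)]) [])

def pvLoopA (grid : List String) (h w : Int) :
    Nat → Int → PySem.Set (Int × Int) → PySem.Dict (List (Int × Int)) Int → Int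
  | 0, _, rocks, _ => pvLoad h rocks
  | f + 1, cycle, rocks, seen =>
    let seen' := seen.insert (pvCanon w rocks) cycle
    let rocks' := [((-1 : Int), (0 : Int)), (0, -1), (1, 0), (0, 1)].foldl
      (fun s d => pvTiltA grid h w d.1 d.2 s) rocks
    match seen'.get? (pvCanon w rocks') with
    | some prev =>
      if prev = 0 then pvLoopA grid h w f (cycle + 1) rocks' seen'
      else
        let cycleLength := (cycle + 1) - prev
        let rem := PySem.Int.mod (1000000000 - cycle - 1) cycleLength
        pvLoad h (((seen'.items.find? (fun q => q.2 = prev + rem)).map Prod.fst).getD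
          (pvCanon w rocks'))
    | none => pvLoopA grid h w f (cycle + 1) rocks' seen'

def computeTotalLoad (grid : List String) : Int :=
  let h := PySem.List.len grid
  let w := PySem.Str.len (PySem.List.pyGetD grid 0 "")
  pvLoopA grid h w 1000000000 0 (pvInitRocks grid h w) PySem.Dict.empty

-- ===== PORT B =====
def pvCellsB (h w : Int) : List (Int × Int) :=
  (PySem.List.pyRange 0 h 1).flatMap (fun r => (PySem.List.pyRange 0 w 1).map (fun c => (r, c)))

def pvTableB (grid : List String) (h w dr dc : Int) (rocks : List (Int × Int)) :
    PySem.Dict (Int × Int) (Int × Int) :=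
  (PySem.List.sorted (pvCellsB h w) (fun p => -(dr * p.1 + dc * p.2)) false).foldl
    (fun t p =>
      if pvBlocked grid h w (p.1 + dr) (p.2 + dc) then t.insert p (0, 0)
      else
        let e := t.getD (p.1 + dr, p.2 + dc) (0, 0)
        t.insert p (e.1 + 1, e.2 + (if (p.1 + dr, p.2 + dc) ∈ rocks then 1 else 0)))
    PySem.Dict.empty

def pvTiltB (grid : List String) (h w dr dc : Int) (rocks : PySem.Set (Int × Int)) :
    PySem.Set (Int × Int) :=
  let table := pvTableB grid h w dr dc rocks
  PySem.Set.ofList (rocks.foldl (fun out p =>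
    let e := table.getD p (0, 0)
    out ++ [(p.1 + dr * (e.1 - e.2), p.2 + dc * (e.1 - e.2))]) [])

def pvSpin (grid : List String) (h w : Int) (s : PySem.Set (Int × Int)) : PySem.Set (Int × Int) :=
  pvTiltB grid h w 0 1 (pvTiltB grid h w 1 0 (pvTiltB grid h w 0 (-1) (pvTiltB grid h w (-1) 0 s)))

def pvLoopB (grid : List String) (h w : Int) :
    Nat → Int → PySem.Set (Int × Int) → PySem.Dict (List (Int × Int)) Int → Int
  | 0, _, state, _ => pvLoad h state
  | f + 1, cycle, state, seen =>
    let seen' := seen.insert (pvCanon w state) cycle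
    let state' := pvSpin grid h w state
    match seen'.get? (pvCanon w state') with
    | some prev =>
      if prev = 0 then pvLoopB grid h w f (cycle + 1) state' seen'
      else
        pvLoad h (((seen'.items.find? (fun q =>
          q.2 = prev + PySem.Int.mod (1000000000 - cycle - 1) (cycle + 1 - prev))).map
            Prod.fst).getD (pvCanon w state'))
    | none => pvLoopB grid h w f (cycle + 1) state' seen'

def computeTotalLoad_alt (grid : List String) : Int :=
  let h := PySem.List.len grid
  let w := PySem.Str.len (PySem.List.pyGetD grid 0 "")
  pvLoopB grid h w 1000000000 0 (pvInitRocks grid h w) PySem.Dict.empty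

-- ===== PRECONDITION & SPEC =====
-- Pre_ excludes exactly the inputs where A raises IndexError: the empty grid (grid[0]),
-- and grids with a row shorter than the first row (grid[row][col] in the comprehension).
def Pre_computeTotalLoad (grid : List String) : Prop :=
  grid ≠ [] ∧ ∀ s ∈ grid, (grid.headD "").length ≤ s.length
instance (grid : List String) : Decidable (Pre_computeTotalLoad grid) := by
  unfold Pre_computeTotalLoad; infer_instance
def pvWitness_computeTotalLoad : List String := ["O#", ".O"]

def Spec_computeTotalLoad (grid : List String) (out : Int) : Prop := out = computeTotalLoad_alt grid
instance (grid : List String) (out : Int) : Decidable (Spec_computeTotalLoad grid out) := by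
  unfold Spec_computeTotalLoad; infer_instance

-- ===== CLAIM (what is proved, stated in full; the proofs are below) =====
def Claim_equal_computeTotalLoad : Prop := ∀ (grid : List String), Dom_computeTotalLoad grid → Pre_computeTotalLoad grid → Spec_computeTotalLoad grid (computeTotalLoad grid)

-- ===== LEMMAS AND PROOFS =====
def pvInB (h w : Int) (p : Int × Int) : Prop := 0 ≤ p.1 ∧ p.1 < h ∧ 0 ≤ p.2 ∧ p.2 < w

def pvDirs : List (Int × Int) := [(-1, 0), (0, -1), (1, 0), (0, 1)]

-- spec of one ray: (length of the open ray from (r,c) toward the barrier, rocks on it)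
def pvRay (grid : List String) (h w dr dc : Int) (rocks : List (Int × Int)) :
    Nat → Int → Int → Int × Int
  | 0, _, _ => (0, 0)
  | f + 1, r, c =>
    if pvBlocked grid h w (r + dr) (c + dc) then (0, 0)
    else
      let e := pvRay grid h w dr dc rocks f (r + dr) (c + dc)
      (e.1 + 1, e.2 + (if (r + dr, c + dc) ∈ rocks then 1 else 0))

theorem pvWalk_eq_ray (grid : List String) (h w dr dc : Int) (rocks : List (Int × Int)) :
    ∀ (f : Nat) (r c acc : Int), pvWalk grid h w dr dc rocks f r c acc =
      acc + (pvRay grid h w dr dc rocks f r c).1 - (pvRay grid h w dr dc rocks f r c).2 := by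
  intro f
  induction f with
  | zero => intro r c acc; simp [pvWalk, pvRay]
  | succ f ih =>
    intro r c acc
    simp only [pvWalk, pvRay]
    split
    · omega
    · rw [ih]
      by_cases hm : (r + dr, c + dc) ∈ rocks <;> simp [hm] <;> omega

theorem pvInB_step (grid : List String) (h w dr dc : Int)
    (hd : (dr, dc) ∈ pvDirs) (r c : Int) (hin : pvInB h w (r, c))
    (hnb : ¬ pvBlocked grid h w (r + dr) (c + dc)) : pvInB h w (r + dr, c + dc) := by
  have hb1 : ¬(r + dr < 0) := fun hx => hnb (by simp [pvBlocked, hx])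
  have hb2 : ¬(r + dr = h) := fun hx => hnb (by simp [pvBlocked, hx])
  have hb3 : ¬(c + dc < 0) := fun hx => hnb (by simp [pvBlocked, hx])
  have hb4 : ¬(c + dc = w) := fun hx => hnb (by simp [pvBlocked, hx])
  obtain ⟨h1, h2, h3, h4⟩ := hin
  simp only [pvDirs, List.mem_cons, Prod.mk.injEq, List.not_mem_nil, or_false] at hd
  rcases hd with ⟨rfl, rfl⟩ | ⟨rfl, rfl⟩ | ⟨rfl, rfl⟩ | ⟨rfl, rfl⟩ <;>
    exact ⟨by omega, by omega, by omega, by omega⟩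

theorem pvRay_succ (grid : List String) (h w dr dc : Int) (rocks : List (Int × Int))
    (f : Nat) (r c : Int) : pvRay grid h w dr dc rocks (f + 1) r c =
      if pvBlocked grid h w (r + dr) (c + dc) then (0, 0)
      else ((pvRay grid h w dr dc rocks f (r + dr) (c + dc)).1 + 1,
        (pvRay grid h w dr dc rocks f (r + dr) (c + dc)).2 +
          if (r + dr, c + dc) ∈ rocks then 1 else 0) := rfl

theorem pvRay_stable (grid : List String) (h w dr dc : Int) (rocks : List (Int × Int))
    (hd : (dr, dc) ∈ pvDirs) :
    ∀ (f : Nat) (r c : Int), pvInB h w (r, c) → h + w - (dr * r + dc * c) ≤ (f : Int) →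
      pvRay grid h w dr dc rocks (f + 1) r c = pvRay grid h w dr dc rocks f r c := by
  intro f
  induction f with
  | zero =>
    intro r c hin hb
    exfalso
    obtain ⟨h1, h2, h3, h4⟩ := hin
    simp only [pvDirs, List.mem_cons, Prod.mk.injEq, List.not_mem_nil, or_false] at hd
    rcases hd with ⟨rfl, rfl⟩ | ⟨rfl, rfl⟩ | ⟨rfl, rfl⟩ | ⟨rfl, rfl⟩ <;>
      (push_cast at hb; ring_nf at hb; omega)
  | succ f ih =>
    intro r c hin hb
    by_cases hblk : pvBlocked grid h w (r + dr) (c + dc)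
    · rw [pvRay_succ grid h w dr dc rocks (f + 1) r c, pvRay_succ grid h w dr dc rocks f r c,
        if_pos hblk, if_pos hblk]
    · have hu : pvInB h w (r + dr, c + dc) := pvInB_step grid h w dr dc hd r c hin hblk
      have hphi : h + w - (dr * (r + dr) + dc * (c + dc)) ≤ (f : Int) := by
        simp only [pvDirs, List.mem_cons, Prod.mk.injEq, List.not_mem_nil, or_false] at hd
        rcases hd with ⟨rfl, rfl⟩ | ⟨rfl, rfl⟩ | ⟨rfl, rfl⟩ | ⟨rfl, rfl⟩ <;>
          (push_cast at hb ⊢; ring_nf at hb ⊢; omega)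
      rw [pvRay_succ grid h w dr dc rocks (f + 1) r c, pvRay_succ grid h w dr dc rocks f r c,
        if_neg hblk, if_neg hblk, ih (r + dr) (c + dc) hu hphi]

theorem pvRay_bounds (grid : List String) (h w dr dc : Int) (rocks : List (Int × Int))
    (hd : (dr, dc) ∈ pvDirs) :
    ∀ (f : Nat) (r c : Int), pvInB h w (r, c) →
      0 ≤ (pvRay grid h w dr dc rocks f r c).2 ∧
      (pvRay grid h w dr dc rocks f r c).2 ≤ (pvRay grid h w dr dc rocks f r c).1 ∧
      ∀ k : Int, 0 ≤ k → k ≤ (pvRay grid h w dr dc rocks f r c).1 →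
        pvInB h w (r + dr * k, c + dc * k) := by
  intro f
  induction f with
  | zero =>
    intro r c hin
    refine ⟨le_refl _, le_refl _, fun k hk0 hk1 => ?_⟩
    have hk : k = 0 := by simpa [pvRay] using (by omega : k ≤ (0 : Int) → k = 0) (by
      simpa [pvRay] using hk1)
    subst hk
    simpa using hin
  | succ f ih =>
    intro r c hin
    by_cases hblk : pvBlocked grid h w (r + dr) (c + dc)
    · rw [pvRay_succ grid h w dr dc rocks f r c, if_pos hblk]
      refine ⟨le_refl _, le_refl _, fun k hk0 hk1 => ?_⟩
      have hk : k = 0 := by omega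
      subst hk
      simpa using hin
    · have hu : pvInB h w (r + dr, c + dc) := pvInB_step grid h w dr dc hd r c hin hblk
      obtain ⟨ih1, ih2, ih3⟩ := ih (r + dr) (c + dc) hu
      rw [pvRay_succ grid h w dr dc rocks f r c, if_neg hblk]
      refine ⟨?_, ?_, ?_⟩
      · dsimp only
        split <;> omega
      · dsimp only
        split <;> omega
      · intro k hk0 hk1
        dsimp only at hk1
        by_cases hk : k = 0
        · subst hk; simpa using hin
        · rw [show r + dr * k = r + dr + dr * (k - 1) by ring,
            show c + dc * k = c + dc + dc * (k - 1) by ring]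
          exact ih3 (k - 1) (by omega) (by omega)

theorem pvMem_cellsB (h w : Int) (q : Int × Int) : q ∈ pvCellsB h w ↔ pvInB h w q := by
  cases q with
  | mk r c =>
    simp only [pvCellsB, List.mem_flatMap, List.mem_map, PySem.List.mem_pyRange_one, pvInB,
      Prod.mk.injEq]
    constructor
    · rintro ⟨a, ⟨ha1, ha2⟩, b, ⟨hb1, hb2⟩, rfl, rfl⟩
      exact ⟨ha1, ha2, hb1, hb2⟩
    · rintro ⟨h1, h2, h3, h4⟩
      exact ⟨r, ⟨h1, h2⟩, c, ⟨h3, h4⟩, rfl, rfl⟩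

theorem pvPhi_lb (h w dr dc : Int) (hd : (dr, dc) ∈ pvDirs) (a b : Int)
    (hu : pvInB h w (a, b)) : -(h + w) ≤ dr * a + dc * b := by
  obtain ⟨h1, h2, h3, h4⟩ := hu
  simp only [pvDirs, List.mem_cons, Prod.mk.injEq, List.not_mem_nil, or_false] at hd
  rcases hd with ⟨rfl, rfl⟩ | ⟨rfl, rfl⟩ | ⟨rfl, rfl⟩ | ⟨rfl, rfl⟩ <;> (ring_nf; omega)

theorem pvKey_step (dr dc : Int) (hd : (dr, dc) ∈ pvDirs) (p : Int × Int) :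
    -(dr * (p.1 + dr) + dc * (p.2 + dc)) = -(dr * p.1 + dc * p.2) - 1 := by
  simp only [pvDirs, List.mem_cons, Prod.mk.injEq, List.not_mem_nil, or_false] at hd
  rcases hd with ⟨rfl, rfl⟩ | ⟨rfl, rfl⟩ | ⟨rfl, rfl⟩ | ⟨rfl, rfl⟩ <;> ring

theorem pvStep_val (grid : List String) (h w dr dc : Int) (rocks : List (Int × Int))
    (hd : (dr, dc) ∈ pvDirs) (p : Int × Int) (hp : pvInB h w p)
    (t : PySem.Dict (Int × Int) (Int × Int))
    (htu : ¬ pvBlocked grid h w (p.1 + dr) (p.2 + dc) →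
      t.getD (p.1 + dr, p.2 + dc) (0, 0) =
        pvRay grid h w dr dc rocks (pvFuel h w) (p.1 + dr) (p.2 + dc)) :
    ((if pvBlocked grid h w (p.1 + dr) (p.2 + dc) then t.insert p (0, 0)
      else
        let e := t.getD (p.1 + dr, p.2 + dc) (0, 0)
        t.insert p (e.1 + 1, e.2 + (if (p.1 + dr, p.2 + dc) ∈ rocks then 1 else 0))).getD p
          (0, 0)) = pvRay grid h w dr dc rocks (pvFuel h w) p.1 p.2 := by
  have hF : pvFuel h w = ((2 * (h + w)).toNat + 3) + 1 := rfl
  by_cases hblk : pvBlocked grid h w (p.1 + dr) (p.2 + dc)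
  · rw [if_pos hblk, PySem.Dict.getD_insert_self, hF,
      pvRay_succ grid h w dr dc rocks _ p.1 p.2, if_pos hblk]
  · have hu : pvInB h w (p.1 + dr, p.2 + dc) := pvInB_step grid h w dr dc hd p.1 p.2 hp hblk
    have hstab : pvRay grid h w dr dc rocks (((2 * (h + w)).toNat + 3) + 1) (p.1 + dr) (p.2 + dc)
        = pvRay grid h w dr dc rocks ((2 * (h + w)).toNat + 3) (p.1 + dr) (p.2 + dc) := by
      apply pvRay_stable grid h w dr dc rocks hd _ _ _ hu
      have hlb := pvPhi_lb h w dr dc hd (p.1 + dr) (p.2 + dc) hu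
      have htn := Int.self_le_toNat (2 * (h + w))
      push_cast
      omega
    rw [if_neg hblk]
    dsimp only
    rw [PySem.Dict.getD_insert_self, htu hblk, hF,
      pvRay_succ grid h w dr dc rocks _ p.1 p.2, if_neg hblk, hstab]

theorem pvFold_inv (grid : List String) (h w dr dc : Int) (rocks : List (Int × Int))
    (hd : (dr, dc) ∈ pvDirs) :
    ∀ (l : List (Int × Int)) (t : PySem.Dict (Int × Int) (Int × Int)),
      (∀ x ∈ l, pvInB h w x) →
      l.Pairwise (fun a b => -(dr * a.1 + dc * a.2) ≤ -(dr * b.1 + dc * b.2)) →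
      (∀ q, pvInB h w q → q ∉ l →
        t.getD q (0, 0) = pvRay grid h w dr dc rocks (pvFuel h w) q.1 q.2) →
      ∀ q, pvInB h w q →
        (q ∈ l ∨ t.getD q (0, 0) = pvRay grid h w dr dc rocks (pvFuel h w) q.1 q.2) →
        (l.foldl (fun t p =>
          if pvBlocked grid h w (p.1 + dr) (p.2 + dc) then t.insert p (0, 0)
          else
            let e := t.getD (p.1 + dr, p.2 + dc) (0, 0)
            t.insert p (e.1 + 1, e.2 + (if (p.1 + dr, p.2 + dc) ∈ rocks then 1 else 0))) t).getD
              q (0, 0) = pvRay grid h w dr dc rocks (pvFuel h w) q.1 q.2 := by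
  intro l
  induction l with
  | nil =>
    intro t _ _ ht q hq hdis
    rcases hdis with hmem | he
    · exact absurd hmem (List.not_mem_nil)
    · simpa using he
  | cons p rest ih =>
    intro t hinl hpw ht q hq hdis
    have hinp : pvInB h w p := hinl p (List.mem_cons_self ..)
    have hpw' := (List.pairwise_cons.mp hpw).2
    have hple := (List.pairwise_cons.mp hpw).1
    -- the neighbour cell was processed before p (its key is one smaller)
    have hunotin : (p.1 + dr, p.2 + dc) ∉ (p :: rest) := by
      intro hmem
      have hk := pvKey_step dr dc hd p
      rcases List.mem_cons.mp hmem with he | hmem'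
      · have h1 : p.1 + dr = p.1 := congrArg Prod.fst he
        have h2 : p.2 + dc = p.2 := congrArg Prod.snd he
        have hdr : dr = 0 := by omega
        have hdc : dc = 0 := by omega
        subst hdr; subst hdc
        simp [pvDirs] at hd
      · have hle := hple _ hmem'
        dsimp only at hle
        omega
    set STEP := fun (t : PySem.Dict (Int × Int) (Int × Int)) (p : Int × Int) =>
      if pvBlocked grid h w (p.1 + dr) (p.2 + dc) then t.insert p (0, 0)
      else
        let e := t.getD (p.1 + dr, p.2 + dc) (0, 0)
        t.insert p (e.1 + 1, e.2 + (if (p.1 + dr, p.2 + dc) ∈ rocks then 1 else 0)) with hSTEP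
    have hstepval : (STEP t p).getD p (0, 0) =
        pvRay grid h w dr dc rocks (pvFuel h w) p.1 p.2 := by
      rw [hSTEP]
      exact pvStep_val grid h w dr dc rocks hd p hinp t
        (fun hnb => ht _ (pvInB_step grid h w dr dc hd p.1 p.2 hinp hnb) hunotin)
    have hsteppres : ∀ q, q ≠ p → (STEP t p).getD q (0, 0) = t.getD q (0, 0) := by
      intro q hne
      rw [hSTEP]
      dsimp only
      split
      · exact PySem.Dict.getD_insert_of_ne _ _ _ hne
      · exact PySem.Dict.getD_insert_of_ne _ _ _ hne
    rw [List.foldl_cons]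
    apply ih (STEP t p) (fun x hx => hinl x (List.mem_cons_of_mem _ hx)) hpw'
    · intro q' hq' hq'notin
      by_cases hqp : q' = p
      · subst hqp; exact hstepval
      · rw [hsteppres q' hqp]
        exact ht q' hq' (by simp [List.mem_cons, hqp, hq'notin])
    · exact hq
    · rcases hdis with hmem | he
      · rcases List.mem_cons.mp hmem with he | hmem'
        · subst he; right; exact hstepval
        · left; exact hmem'
      · right
        by_cases hqp : q = p
        · subst hqp; exact hstepval
        · rw [hsteppres q hqp]; exact he

theorem pvTableB_getD (grid : List String) (h w dr dc : Int) (rocks : List (Int × Int))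
    (hd : (dr, dc) ∈ pvDirs) :
    ∀ q, pvInB h w q → (pvTableB grid h w dr dc rocks).getD q (0, 0) =
      pvRay grid h w dr dc rocks (pvFuel h w) q.1 q.2 := by
  intro q hq
  unfold pvTableB
  apply pvFold_inv grid h w dr dc rocks hd
  · intro x hx
    exact (pvMem_cellsB h w x).mp ((PySem.List.mem_sorted _ _ _ _).mp hx)
  · exact PySem.List.sorted_pairwise _ _
  · intro q' hq' hq'notin
    exact absurd ((PySem.List.mem_sorted _ _ _ _).mpr ((pvMem_cellsB h w q').mpr hq')) hq'notin
  · exact hq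
  · left
    exact (PySem.List.mem_sorted _ _ _ _).mpr ((pvMem_cellsB h w q).mpr hq)

theorem pvTilt_eq (grid : List String) (h w dr dc : Int) (rocks : PySem.Set (Int × Int))
    (hd : (dr, dc) ∈ pvDirs) (hr : ∀ p ∈ rocks, pvInB h w p) :
    pvTiltA grid h w dr dc rocks = pvTiltB grid h w dr dc rocks := by
  unfold pvTiltA pvTiltB
  dsimp only
  rw [PySem.List.foldl_append_singleton_eq_map, PySem.List.foldl_append_singleton_eq_map]
  simp only [List.nil_append]
  congr 1
  apply List.map_congr_left
  intro p hp
  have hpin : pvInB h w p := hr p hp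
  rw [pvWalk_eq_ray grid h w dr dc rocks (pvFuel h w) p.1 p.2 0,
    pvTableB_getD grid h w dr dc rocks hd p hpin, Prod.mk.injEq]
  constructor <;> ring

theorem pvTiltB_inB (grid : List String) (h w dr dc : Int) (rocks : PySem.Set (Int × Int))
    (hd : (dr, dc) ∈ pvDirs) (hr : ∀ p ∈ rocks, pvInB h w p) :
    ∀ q ∈ pvTiltB grid h w dr dc rocks, pvInB h w q := by
  intro q hq
  unfold pvTiltB at hq
  dsimp only at hq
  rw [PySem.Set.mem_ofList, PySem.List.foldl_append_singleton_eq_map] at hq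
  simp only [List.nil_append, List.mem_map] at hq
  obtain ⟨p, hp, rfl⟩ := hq
  have hpin : pvInB h w p := hr p hp
  rw [pvTableB_getD grid h w dr dc rocks hd p hpin]
  obtain ⟨hb1, hb2, hb3⟩ := pvRay_bounds grid h w dr dc rocks hd (pvFuel h w) p.1 p.2 hpin
  exact hb3 _ (by omega) (by omega)

theorem pvLoop_eq (grid : List String) (h w : Int) :
    ∀ (f : Nat) (cycle : Int) (state : PySem.Set (Int × Int))
      (seen : PySem.Dict (List (Int × Int)) Int), (∀ p ∈ state, pvInB h w p) →
      pvLoopA grid h w f cycle state seen = pvLoopB grid h w f cycle state seen := by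
  intro f
  induction f with
  | zero => intro cycle state seen _; rfl
  | succ f ih =>
    intro cycle state seen hstate
    have hd1 : ((-1 : Int), (0 : Int)) ∈ pvDirs := by simp [pvDirs]
    have hd2 : ((0 : Int), (-1 : Int)) ∈ pvDirs := by simp [pvDirs]
    have hd3 : ((1 : Int), (0 : Int)) ∈ pvDirs := by simp [pvDirs]
    have hd4 : ((0 : Int), (1 : Int)) ∈ pvDirs := by simp [pvDirs]
    have hs1 := pvTiltB_inB grid h w (-1) 0 state hd1 hstate
    have hs2 := pvTiltB_inB grid h w 0 (-1) _ hd2 hs1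
    have hs3 := pvTiltB_inB grid h w 1 0 _ hd3 hs2
    have hs4 := pvTiltB_inB grid h w 0 1 _ hd4 hs3
    simp only [pvLoopA, pvLoopB, pvSpin, List.foldl_cons, List.foldl_nil]
    rw [pvTilt_eq grid h w (-1) 0 state hd1 hstate,
      pvTilt_eq grid h w 0 (-1) _ hd2 hs1,
      pvTilt_eq grid h w 1 0 _ hd3 hs2,
      pvTilt_eq grid h w 0 1 _ hd4 hs3]
    cases hget : PySem.Dict.get? (seen.insert (pvCanon w state) cycle)
        (pvCanon w (pvTiltB grid h w 0 1 (pvTiltB grid h w 1 0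
          (pvTiltB grid h w 0 (-1) (pvTiltB grid h w (-1) 0 state))))) with
    | none => exact ih _ _ _ hs4
    | some prev =>
      by_cases hp0 : prev = 0
      · simp only [hp0]
        exact ih _ _ _ hs4
      · simp only [if_neg hp0]

theorem pvInitRocks_inB (grid : List String) (h w : Int) :
    ∀ p ∈ pvInitRocks grid h w, pvInB h w p := by
  intro p hp
  unfold pvInitRocks at hp
  rw [PySem.Set.mem_ofList] at hp
  simp only [List.mem_flatMap, List.mem_filterMap, PySem.List.mem_pyRange_one] at hp
  obtain ⟨r, hrmem, c, hcmem, hfc⟩ := hp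
  split at hfc
  · cases hfc
    exact ⟨hrmem.1, hrmem.2, hcmem.1, hcmem.2⟩
  · cases hfc

-- ===== VERDICT (by name: the statement is the Claim_ definition above) =====
theorem computeTotalLoad_spec : Claim_equal_computeTotalLoad := by
  intro grid _ _
  unfold Spec_computeTotalLoad computeTotalLoad computeTotalLoad_alt
  exact pvLoop_eq grid _ _ 1000000000 0 _ _ (pvInitRocks_inB grid _ _)
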